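-- pv_equiv track=rewrite | github.com/ljstrnadiii/rayzin | src/rayzin/selectors.py | _split_interval_on_chunk_boundaries
-- ===== SOURCE A (Python) =====
-- from typing import TypeAlias
--
-- Interval: TypeAlias = tuple[int, int]
--
-- def _split_interval_on_chunk_boundaries(start: int, stop: int, chunk_size: int) -> list[Interval]:
--     if start >= stop:
--         return []
--
--     intervals: list[Interval] = []
--     current = start
--     while current < stop:
--         next_boundary = ((current // chunk_size) + 1) * chunk_size
--         next_stop = min(stop, next_boundary)
--         intervals.append((int(current), int(next_stop)))
--         current = next_stop
--     return intervals
-- ===== SOURCE B (Python) =====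
-- def _split_interval_on_chunk_boundaries(start, stop, chunk_size):
--     # Closed form: compute the first chunk boundary and the number of boundaries,
--     # then emit all full chunks by index with a range comprehension.
--     if start >= stop:
--         return []
--     first = (start // chunk_size + 1) * chunk_size
--     if first >= stop:
--         return [(int(start), int(stop))]
--     m = -((first - stop) // chunk_size)  # ceil((stop - first) / chunk_size)
--     return ([(int(start), int(first))]
--             + [(int(first + i * chunk_size), int(first + (i + 1) * chunk_size))
--                for i in range(m - 1)]
--             + [(int(first + (m - 1) * chunk_size), int(stop))])
-- ===== Notes on version B (the rewrite author's own statement) =====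
-- stated objective: alternative
-- what changed: A emits intervals one by one while advancing a cursor and re-deriving each boundary with floor-division and min(); B computes the first boundary and the total number of chunks in closed form (a ceiling division) and emits all full chunks by index with a single range comprehension, plus explicit first and last partial intervals.
import Mathlib
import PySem

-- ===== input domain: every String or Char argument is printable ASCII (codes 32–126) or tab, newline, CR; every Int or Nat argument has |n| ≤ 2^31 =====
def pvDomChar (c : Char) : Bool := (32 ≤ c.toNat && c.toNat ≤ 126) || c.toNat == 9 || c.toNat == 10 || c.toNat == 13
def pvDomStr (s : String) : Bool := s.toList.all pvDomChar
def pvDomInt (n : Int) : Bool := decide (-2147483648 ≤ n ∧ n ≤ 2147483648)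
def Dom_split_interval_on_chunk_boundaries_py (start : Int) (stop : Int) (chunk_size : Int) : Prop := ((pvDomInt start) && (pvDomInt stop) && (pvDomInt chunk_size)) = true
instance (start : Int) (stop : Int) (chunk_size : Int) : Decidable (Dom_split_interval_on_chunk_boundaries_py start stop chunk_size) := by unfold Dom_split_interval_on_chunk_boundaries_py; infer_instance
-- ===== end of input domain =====

-- B replaces A's emit-while-advancing cursor loop by a closed form: first boundary and
-- chunk count via ceiling division, full chunks emitted by index over a range; objective: alternative.


-- ===== PORT A =====
-- A's while loop, fueled ((stop-start).toNat bounds the iteration count since each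
-- step advances the cursor by at least 1 when chunk_size > 0; Pre_ excludes the rest).
def pvLoopA (stop chunk_size : Int) : Nat → Int → List (Int × Int)
  | 0, _ => []
  | fuel + 1, current =>
    if current < stop then
      let next_boundary := (PySem.Int.floordiv current chunk_size + 1) * chunk_size
      let next_stop := min stop next_boundary
      (current, next_stop) :: pvLoopA stop chunk_size fuel next_stop
    else []

def split_interval_on_chunk_boundaries_py (start : Int) (stop : Int) (chunk_size : Int) : List (Int × Int) :=
  if start ≥ stop then []
  else pvLoopA stop chunk_size (stop - start).toNat start

-- ===== PORT B =====
def split_interval_on_chunk_boundaries_py_alt (start : Int) (stop : Int) (chunk_size : Int) : List (Int × Int) :=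
  if start ≥ stop then []
  else
    let first := (PySem.Int.floordiv start chunk_size + 1) * chunk_size
    if first ≥ stop then [(start, stop)]
    else
      let m := -(PySem.Int.floordiv (first - stop) chunk_size)
      [(start, first)]
        ++ (PySem.List.pyRange 0 (m - 1) 1).map
             (fun i => (first + i * chunk_size, first + (i + 1) * chunk_size))
        ++ [(first + (m - 1) * chunk_size, stop)]

-- ===== PRECONDITION & SPEC =====
-- Pre_ excludes only inputs where A returns no value: with start < stop, chunk_size = 0
-- raises ZeroDivisionError and chunk_size < 0 loops forever.
def Pre_split_interval_on_chunk_boundaries_py (start : Int) (stop : Int) (chunk_size : Int) : Prop :=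
  start ≥ stop ∨ 0 < chunk_size
instance (start : Int) (stop : Int) (chunk_size : Int) : Decidable (Pre_split_interval_on_chunk_boundaries_py start stop chunk_size) := by unfold Pre_split_interval_on_chunk_boundaries_py; infer_instance

def pvWitness_split_interval_on_chunk_boundaries_py : Int × Int × Int := (2, 17, 5)

def Spec_split_interval_on_chunk_boundaries_py (start : Int) (stop : Int) (chunk_size : Int) (out : List (Int × Int)) : Prop := out = split_interval_on_chunk_boundaries_py_alt start stop chunk_size
instance (start : Int) (stop : Int) (chunk_size : Int) (out : List (Int × Int)) : Decidable (Spec_split_interval_on_chunk_boundaries_py start stop chunk_size out) := by unfold Spec_split_interval_on_chunk_boundaries_py; infer_instance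

-- ===== CLAIM (what is proved, stated in full; the proofs are below) =====
def Claim_equal_split_interval_on_chunk_boundaries_py : Prop := ∀ (start : Int) (stop : Int) (chunk_size : Int), Dom_split_interval_on_chunk_boundaries_py start stop chunk_size → Pre_split_interval_on_chunk_boundaries_py start stop chunk_size → Spec_split_interval_on_chunk_boundaries_py start stop chunk_size (split_interval_on_chunk_boundaries_py start stop chunk_size)

-- ===== LEMMAS AND PROOFS =====

-- The next boundary from a cursor is strictly above it.
theorem pv_bd_gt (current cs : Int) (hcs : 0 < cs) :
    current < (PySem.Int.floordiv current cs + 1) * cs := by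
  rw [PySem.Int.floordiv_eq_ediv_of_pos hcs]
  have := Int.lt_ediv_add_one_mul_self current hcs
  omega

-- From a multiple of cs, the next boundary is exactly cs further.
theorem pv_bd_next (b cs : Int) (hcs : 0 < cs) (hdvd : cs ∣ b) :
    (PySem.Int.floordiv b cs + 1) * cs = b + cs := by
  rw [PySem.Int.floordiv_eq_ediv_of_pos hcs]
  obtain ⟨k, rfl⟩ := hdvd
  rw [Int.mul_ediv_cancel_left _ (by omega : cs ≠ 0)]
  ring

theorem pv_fd_neg (x cs : Int) (hcs : 0 < cs) (h2 : x < 0) :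
    PySem.Int.floordiv x cs ≤ -1 := by
  rw [PySem.Int.floordiv_eq_ediv_of_pos hcs]
  have h3 := Int.mul_ediv_add_emod x cs
  have h4 := Int.emod_nonneg x (by omega : cs ≠ 0)
  by_contra h
  have h5 : 0 ≤ x / cs := by omega
  nlinarith

theorem pv_fd_neg_one (x cs : Int) (hcs : 0 < cs) (h1 : -cs ≤ x) (h2 : x < 0) :
    PySem.Int.floordiv x cs = -1 := by
  have h6 := pv_fd_neg x cs hcs h2
  rw [PySem.Int.floordiv_eq_ediv_of_pos hcs] at h6 ⊢
  have h3 := Int.mul_ediv_add_emod x cs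
  have h5 := Int.emod_lt_of_pos x hcs
  by_contra h
  have h7 : x / cs ≤ -2 := by omega
  nlinarith

theorem pv_fd_add_self (x cs : Int) (hcs : 0 < cs) :
    PySem.Int.floordiv (x + cs) cs = PySem.Int.floordiv x cs + 1 := by
  rw [PySem.Int.floordiv_eq_ediv_of_pos hcs, PySem.Int.floordiv_eq_ediv_of_pos hcs]
  have := Int.add_mul_ediv_right x 1 (by omega : cs ≠ 0)
  simpa using this

theorem pvLoopA_stop (stop cs : Int) (f : Nat) : pvLoopA stop cs f stop = [] := by
  cases f <;> simp [pvLoopA]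

-- Closed form of A's loop from a multiple b of cs, with m = -((b - stop) // cs) chunks.
theorem pv_closed (stop cs : Int) (hcs : 0 < cs) :
    ∀ (fuel : Nat) (b : Int), cs ∣ b → b < stop → (stop - b - cs).toNat ≤ fuel →
      pvLoopA stop cs (fuel + 1) b =
        (PySem.List.pyRange 0 (-(PySem.Int.floordiv (b - stop) cs) - 1) 1).map
            (fun i => (b + i * cs, b + (i + 1) * cs))
          ++ [(b + (-(PySem.Int.floordiv (b - stop) cs) - 1) * cs, stop)] := by
  intro fuel
  induction fuel with
  | zero =>
    intro b hdvd hlt hf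
    have hle : stop ≤ b + cs := by omega
    have hm : PySem.Int.floordiv (b - stop) cs = -1 :=
      pv_fd_neg_one _ _ hcs (by omega) (by omega)
    have hnext := pv_bd_next b cs hcs hdvd
    have hmin : min stop ((PySem.Int.floordiv b cs + 1) * cs) = stop := by
      rw [hnext]; omega
    simp only [pvLoopA, if_pos hlt, hmin, hm]
    rw [PySem.List.pyRange_one_eq_nil (by omega)]
    norm_num
  | succ f ih =>
    intro b hdvd hlt hf
    have hnext := pv_bd_next b cs hcs hdvd
    by_cases hb2 : b + cs < stop
    · have hdvd' : cs ∣ b + cs := dvd_add hdvd dvd_rfl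
      have hstep : PySem.Int.floordiv (b + cs - stop) cs = PySem.Int.floordiv (b - stop) cs + 1 := by
        have := pv_fd_add_self (b - stop) cs hcs
        rw [show b + cs - stop = b - stop + cs by ring, this]
      have hq' : PySem.Int.floordiv (b + cs - stop) cs ≤ -1 :=
        pv_fd_neg _ _ hcs (by omega)
      have hm2 : 2 ≤ -(PySem.Int.floordiv (b - stop) cs) := by omega
      have hmin : min stop ((PySem.Int.floordiv b cs + 1) * cs) = b + cs := by
        rw [hnext]; omega
      have lhs : pvLoopA stop cs (f + 1 + 1) b
          = (b, b + cs) :: pvLoopA stop cs (f + 1) (b + cs) := by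
        simp only [pvLoopA, if_pos hlt, hmin]
      rw [lhs, ih (b + cs) hdvd' hb2 (by omega), hstep]
      set q : Int := PySem.Int.floordiv (b - stop) cs with hq
      -- peel the head of the range on the right-hand side
      rw [PySem.List.pyRange_one_cons (by omega : (0:Int) < -q - 1), List.map_cons,
        show (0:Int) + 1 = 1 by norm_num]
      have hrange : PySem.List.pyRange 1 (-q - 1) 1
          = (PySem.List.pyRange 0 (-(q + 1) - 1) 1).map (fun i => i + 1) := by
        rw [PySem.List.pyRange_one, PySem.List.pyRange_one]
        rw [show (-q - 1 - 1).toNat = (-(q + 1) - 1 - 0).toNat by omega]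
        rw [List.map_map]
        exact List.map_congr_left (fun k _ => by simp; ring)
      rw [hrange, List.map_map]
      congr 1
      · simp only [Prod.mk.injEq]; constructor <;> ring
      congr 1
      · exact List.map_congr_left
          (fun k _ => by simp only [Function.comp, Prod.mk.injEq]; constructor <;> ring)
      · rw [show b + cs + (-(q + 1) - 1) * cs = b + (-q - 1) * cs by ring]
    · have hle : stop ≤ b + cs := by omega
      have hm : PySem.Int.floordiv (b - stop) cs = -1 :=
        pv_fd_neg_one _ _ hcs (by omega) (by omega)
      have hmin : min stop ((PySem.Int.floordiv b cs + 1) * cs) = stop := by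
        rw [hnext]; omega
      simp only [pvLoopA, if_pos hlt, hmin, hm]
      rw [PySem.List.pyRange_one_eq_nil (by omega)]
      norm_num

theorem split_interval_main (start stop cs : Int)
    (hpre : start ≥ stop ∨ 0 < cs) :
    split_interval_on_chunk_boundaries_py start stop cs =
      split_interval_on_chunk_boundaries_py_alt start stop cs := by
  unfold split_interval_on_chunk_boundaries_py split_interval_on_chunk_boundaries_py_alt
  by_cases hge : start ≥ stop
  · simp [hge]
  · have hlt : start < stop := by omega
    have hcs : 0 < cs := by tauto
    simp only [if_neg hge]
    set first : Int := (PySem.Int.floordiv start cs + 1) * cs with hfirst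
    have hbd : start < first := pv_bd_gt start cs hcs
    have hfuel : (stop - start).toNat = (stop - start - 1).toNat + 1 := by omega
    by_cases hfs : first ≥ stop
    · -- single interval
      have hmin : min stop first = stop := by omega
      rw [hfuel]
      simp only [pvLoopA, if_pos hlt, ← hfirst, hmin, pvLoopA_stop, if_pos hfs]
    · have hdvd : cs ∣ first := ⟨PySem.Int.floordiv start cs + 1, by rw [hfirst]; ring⟩
      have hmin : min stop first = first := by omega
      rw [hfuel]
      have lhs : pvLoopA stop cs ((stop - start - 1).toNat + 1) start
          = (start, first) :: pvLoopA stop cs (stop - start - 1).toNat first := by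
        simp only [pvLoopA, if_pos hlt, ← hfirst, hmin]
      rw [lhs]
      have hf2 : (stop - start - 1).toNat = ((stop - start - 1).toNat - 1) + 1 := by
        omega
      rw [hf2, pv_closed stop cs hcs _ first hdvd (by omega) (by omega)]
      simp [if_neg hfs]

-- ===== VERDICT (by name: the statement is the Claim_ definition above) =====
theorem split_interval_on_chunk_boundaries_py_spec : Claim_equal_split_interval_on_chunk_boundaries_py := by
  intro start stop cs _ hpre
  unfold Spec_split_interval_on_chunk_boundaries_py
  exact split_interval_main start stop cs hpre
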